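-- pv_equiv track=rewrite | github.com/MikeMitop/ParcialLenguajesC1 | 1/afd.py | afd_ajedrez
-- ===== SOURCE A (Python) =====
-- def afd_ajedrez(cadena):
--     estado = 0
--     i = 0
--     while i < len(cadena):
--         char = cadena[i]
--         if estado == 0:
--             if char.isalpha(): estado = 1
--             else: estado = 6
--         elif estado == 1:
--             if char.isalpha(): estado = 1
--             elif char == '-': estado = 2
--             elif char == ' ': estado = 3
--             else: estado = 6
--         elif estado == 2:
--             if char == '>': estado = 4
--             else: estado = 6
--         elif estado == 3:
--             if char == 'X':
--                 if i + 1 < len(cadena) and cadena[i+1] == ' ':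
--                     estado = 4
--                     i += 1 #
--                 else: estado = 6
--             else: estado = 6
--         elif estado == 4:
--             if char.isalnum(): estado = 5
--             else: estado = 6
--         elif estado == 5:
--             if char.isalnum(): estado = 5
--             else: estado = 6
--         elif estado == 6:
--             break
--         i += 1
--
--     return estado == 5
-- ===== SOURCE B (Python) =====
-- def afd_ajedrez(cadena):
--     # leading maximal run of letters
--     i = 0
--     while i < len(cadena) and cadena[i].isalpha():
--         i += 1
--     if i == 0:
--         return False
--     resto = cadena[i:]
--     if resto.startswith('->'):
--         destino = resto[2:]
--     elif resto.startswith(' X '):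
--         destino = resto[3:]
--     else:
--         return False
--     return destino.isalnum()
-- ===== Notes on version B (the rewrite author's own statement) =====
-- stated objective: simpler
-- what changed: Replaced the 7-state per-character DFA with a direct decomposition: length of the leading isalpha() run (must be at least 1), a startswith test for the two-char arrow separator or the three-char space-X-space separator, then isalnum() on the remaining destination.
import Mathlib
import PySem

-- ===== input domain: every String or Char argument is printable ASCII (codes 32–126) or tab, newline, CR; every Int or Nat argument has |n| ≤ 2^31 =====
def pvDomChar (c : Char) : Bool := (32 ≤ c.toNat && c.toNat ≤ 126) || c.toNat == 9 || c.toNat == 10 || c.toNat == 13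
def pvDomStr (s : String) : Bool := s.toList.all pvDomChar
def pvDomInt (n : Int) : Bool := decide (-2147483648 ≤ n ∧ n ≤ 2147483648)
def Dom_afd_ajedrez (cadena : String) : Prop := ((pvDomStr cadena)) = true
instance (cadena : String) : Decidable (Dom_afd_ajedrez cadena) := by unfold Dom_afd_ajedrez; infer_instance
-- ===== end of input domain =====

-- B replaces A's per-character 7-state DFA by a direct decomposition: leading letter run,
-- separator test ('->' or ' X '), then an all-alnum check on the remainder (objective: simpler; same cost).

-- ===== PORT A =====
-- the while loop of A, recursing on the remaining characters; `estado` is the DFA state.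
-- The state-3 lookahead `cadena[i+1] == ' '` (with `i += 1`) is the inner match on `rest`.
-- A state of 6 makes the loop break on the next iteration; returning 6 at once is the same value.
def afdALoop : Nat → List Char → Nat
  | estado, [] => estado
  | estado, char :: rest =>
    if estado = 0 then
      afdALoop (if PySem.Chars.isalpha char then 1 else 6) rest
    else if estado = 1 then
      afdALoop (if PySem.Chars.isalpha char then 1
                else if char = '-' then 2
                else if char = ' ' then 3 else 6) rest
    else if estado = 2 then
      afdALoop (if char = '>' then 4 else 6) rest
    else if estado = 3 then
      if char = 'X' then
        -- Python: `if i + 1 < len(cadena) and cadena[i+1] == ' '` with the extra `i += 1`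
        if rest.head? = some ' ' then afdALoop 4 rest.tail else 6
      else 6
    else if estado = 4 then
      afdALoop (if PySem.Chars.isalnum char then 5 else 6) rest
    else if estado = 5 then
      afdALoop (if PySem.Chars.isalnum char then 5 else 6) rest
    else 6
termination_by estado cs => cs.length
decreasing_by all_goals (simp [List.length_tail]; try omega)

def afd_ajedrez (cadena : String) : Bool :=
  afdALoop 0 cadena.toList = 5

-- ===== PORT B =====
-- length of the maximal leading run of letters (B's first while loop)
def runAlpha : List Char → Nat
  | [] => 0
  | c :: r => if PySem.Chars.isalpha c then runAlpha r + 1 else 0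

-- the separator/destination test on the remainder (B's startswith chain)
def tailChk (resto : List Char) : Bool :=
  if PySem.Chars.startswith resto ['-', '>'] then
    PySem.Chars.strIsalnum (resto.drop 2)
  else if PySem.Chars.startswith resto [' ', 'X', ' '] then
    PySem.Chars.strIsalnum (resto.drop 3)
  else false

def afd_ajedrez_alt (cadena : String) : Bool :=
  let cs := cadena.toList
  let i := runAlpha cs
  if i = 0 then false
  else tailChk (cs.drop i)

-- ===== PRECONDITION & SPEC =====
def Spec_afd_ajedrez (cadena : String) (out : Bool) : Prop := out = afd_ajedrez_alt cadena
instance (cadena : String) (out : Bool) : Decidable (Spec_afd_ajedrez cadena out) := by unfold Spec_afd_ajedrez; infer_instance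

-- ===== CLAIM (what is proved, stated in full; the proofs are below) =====
def Claim_equal_afd_ajedrez : Prop := ∀ (cadena : String), Dom_afd_ajedrez cadena → Spec_afd_ajedrez cadena (afd_ajedrez cadena)

-- ===== LEMMAS AND PROOFS =====

theorem afdALoop_six (cs : List Char) : afdALoop 6 cs = 6 := by
  cases cs <;> simp [afdALoop]

theorem afdALoop_five (cs : List Char) :
    (afdALoop 5 cs = 5) = cs.all PySem.Chars.isalnum := by
  induction cs with
  | nil => simp [afdALoop]
  | cons c r ih =>
    by_cases h : PySem.Chars.isalnum c = true
    · simp [afdALoop, h, ih]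
    · simp [afdALoop, h, afdALoop_six]

theorem afdALoop_four (cs : List Char) :
    (afdALoop 4 cs = 5) = PySem.Chars.strIsalnum cs := by
  cases cs with
  | nil => simp [afdALoop, PySem.Chars.strIsalnum]
  | cons c r =>
    by_cases h : PySem.Chars.isalnum c = true
    · simp [afdALoop, h, afdALoop_five, PySem.Chars.strIsalnum]
    · simp [afdALoop, h, afdALoop_six, PySem.Chars.strIsalnum]

theorem afdALoop_three (cs : List Char) :
    (afdALoop 3 cs = 5) = tailChk (' ' :: cs) := by
  cases cs with
  | nil => simp [afdALoop, tailChk, PySem.Chars.startswith, List.isPrefixOf]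
  | cons c r =>
    by_cases hc : c = 'X'
    · subst hc
      cases r with
      | nil => simp [afdALoop, tailChk, PySem.Chars.startswith, List.isPrefixOf]
      | cons d r2 =>
        by_cases hd : d = ' '
        · subst hd
          simp [afdALoop, afdALoop_four, tailChk, PySem.Chars.startswith, List.isPrefixOf]
        · simp [afdALoop, hd, Ne.symm hd, tailChk, PySem.Chars.startswith, List.isPrefixOf]
    · simp [afdALoop, hc, Ne.symm hc, tailChk, PySem.Chars.startswith, List.isPrefixOf]

theorem afdALoop_two (cs : List Char) :
    (afdALoop 2 cs = 5) = tailChk ('-' :: cs) := by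
  cases cs with
  | nil => simp [afdALoop, tailChk, PySem.Chars.startswith, List.isPrefixOf]
  | cons c r =>
    by_cases hc : c = '>'
    · subst hc
      simp [afdALoop, afdALoop_four, tailChk, PySem.Chars.startswith, List.isPrefixOf]
    · simp [afdALoop, hc, Ne.symm hc, afdALoop_six, tailChk, PySem.Chars.startswith, List.isPrefixOf]

theorem tailChk_other (c : Char) (r : List Char)
    (h1 : c ≠ '-') (h2 : c ≠ ' ') : tailChk (c :: r) = false := by
  simp [tailChk, PySem.Chars.startswith, List.isPrefixOf, Ne.symm h1, Ne.symm h2]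

theorem afdALoop_one (cs : List Char) :
    (afdALoop 1 cs = 5) = tailChk (cs.drop (runAlpha cs)) := by
  induction cs with
  | nil => simp [afdALoop, runAlpha, tailChk, PySem.Chars.startswith, List.isPrefixOf]
  | cons c r ih =>
    by_cases ha : PySem.Chars.isalpha c = true
    · simpa [afdALoop, ha, runAlpha] using ih
    · by_cases h1 : c = '-'
      · subst h1
        simp [afdALoop, ha, runAlpha, afdALoop_two]
      · by_cases h2 : c = ' '
        · subst h2
          simp [afdALoop, ha, runAlpha, afdALoop_three]
        · simp [afdALoop, ha, h1, h2, runAlpha, afdALoop_six, tailChk_other c r h1 h2]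

-- ===== VERDICT (by name: the statement is the Claim_ definition above) =====
theorem afd_ajedrez_spec : Claim_equal_afd_ajedrez := by
  intro cadena _
  unfold Spec_afd_ajedrez afd_ajedrez afd_ajedrez_alt
  cases hcs : cadena.toList with
  | nil => simp [afdALoop, runAlpha]
  | cons c r =>
    by_cases ha : PySem.Chars.isalpha c = true
    · simp [afdALoop, ha, runAlpha, afdALoop_one]
    · simp [afdALoop, ha, runAlpha, afdALoop_six]
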